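-- pv_equiv track=rewrite | github.com/ottjb/Advent-of-Code-2025 | day06/solution.py | part1
-- ===== SOURCE A (Python) =====
-- def part1(data):
--     """Solve part 1"""
--     for i in range(len(data)):
--         if data[i][0] == "+" or data[i][0] == "*":
--             data[i] = process_row(data[i], False)
--         else:
--             data[i] = process_row(data[i])
--     total = 0
--     for i in range(len(data[0])):
--         nums = []
--         for j in range(len(data) - 1):
--             nums.append(data[j][i])
--         if data[-1][i] == "+":
--             total += sum(nums)
--         else:
--             product = 1
--             for n in nums:
--                 product *= n
--             total += product
--     return total
--
-- def process_row(row, ints=True):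
--     new_row = row.split(" ")
--     new_row = [x for x in new_row if x != ""]
--     if ints:
--         new_row = [int(x) for x in new_row]
--     return new_row
-- ===== SOURCE B (Python) =====
-- def part1(data):
--     """Solve part 1"""
--     for i in range(len(data)):
--         if data[i][0] == "+" or data[i][0] == "*":
--             data[i] = process_row(data[i], False)
--         else:
--             data[i] = process_row(data[i])
--     ops = data[-1]
--     acc = [0 if ops[i] == "+" else 1 for i in range(len(data[0]))]
--     for row in data[:-1]:
--         acc = [a + v if o == "+" else a * v for a, o, v in zip(acc, ops, row)]
--     return sum(acc)
--
-- def process_row(row, ints=True):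
--     new_row = row.split(" ")
--     new_row = [x for x in new_row if x != ""]
--     if ints:
--         new_row = [int(x) for x in new_row]
--     return new_row
-- ===== Notes on version B (the rewrite author's own statement) =====
-- stated objective: alternative
-- what changed: Replaces A's column-major nested scan (rebuilding a nums list per column, then sum or hand-rolled product) with a single row-major streaming pass over per-column accumulators initialized from the operator row (0 for '+', 1 for '*'), summed at the end; the in-place parsing mutation of data is kept.
import Mathlib
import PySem

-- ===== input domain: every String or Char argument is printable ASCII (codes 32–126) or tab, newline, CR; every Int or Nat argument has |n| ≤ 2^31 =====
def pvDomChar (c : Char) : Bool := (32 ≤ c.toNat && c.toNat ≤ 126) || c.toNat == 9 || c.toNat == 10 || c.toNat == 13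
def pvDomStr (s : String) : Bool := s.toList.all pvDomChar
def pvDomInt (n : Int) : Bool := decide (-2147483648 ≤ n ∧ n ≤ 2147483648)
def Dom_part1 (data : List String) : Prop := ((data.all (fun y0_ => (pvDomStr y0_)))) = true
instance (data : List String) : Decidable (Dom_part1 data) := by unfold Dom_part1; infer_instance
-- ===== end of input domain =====

-- B replaces A's column-major nested scan with one row-major streaming pass over per-column
-- accumulators (objective: alternative decomposition, same cost). A and B mutate `data` in place
-- identically during parsing; the equivalence proved here is about the return value.

-- A processed cell is an int (number row) or a string token (operator row): Int ⊕ String.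

-- row.split(" ") then drop empty tokens (shared helper process_row's tokenisation)
def pvTokens (s : String) : List String :=
  ((PySem.Str.split? s " ").getD []).filter (fun x => x ≠ "")

-- process_row(row, ints): tokens, mapped through int() when ints.
-- (PySem.Int.ofStr? x) = none is Python's ValueError — excluded by Pre_part1; default 0 unreachable there.
def pvProcessRow (row : String) (ints : Bool) : List (Int ⊕ String) :=
  let nr := pvTokens row
  if ints then nr.map (fun x => Sum.inl ((PySem.Int.ofStr? x).getD 0))
  else nr.map Sum.inr

-- data[i][0] == "+" or data[i][0] == "*" ; s[0] on "" is IndexError — excluded by Pre_part1.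
def pvIsOp (s : String) : Bool :=
  match PySem.Str.pyGet? s 0 with
  | some c => c == '+' || c == '*'
  | none => false

-- a cell used as an int (a string cell there is Python's TypeError — excluded by Pre_part1)
def pvCellInt (c : Int ⊕ String) : Int :=
  match c with
  | .inl n => n
  | .inr _ => 0

-- the parsing loop (phase 1, identical in A and B): data[i] = process_row(data[i], ints?)
def pvParse (data : List String) : List (List (Int ⊕ String)) :=
  data.map (fun s => if pvIsOp s then pvProcessRow s false else pvProcessRow s true)

-- ===== PORT A =====
-- pdata[j][i] on the parsed data (IndexError = none, excluded by Pre_part1)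
def pvCellAt (pdata : List (List (Int ⊕ String))) (j i : Nat) : Int ⊕ String :=
  (PySem.List.pyGet? ((PySem.List.pyGet? pdata (j : Int)).getD []) (i : Int)).getD (Sum.inl 0)

-- phase 2 of A, over the mutated `data` (= the parsed rows): per column, gather nums, then sum or product
def pvTotalA (pdata : List (List (Int ⊕ String))) : Int :=
  (List.range (pdata.headD []).length).foldl (fun total i =>
    let nums := (List.range (pdata.length - 1)).foldl (fun acc j => acc ++ [pvCellAt pdata j i]) []
    if (PySem.List.pyGet? ((PySem.List.pyGet? pdata (-1)).getD []) (i : Int)).getD (Sum.inl 0)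
        = Sum.inr "+" then
      total + nums.foldl (fun a c => a + pvCellInt c) 0       -- total += sum(nums)
    else
      total + nums.foldl (fun p c => p * pvCellInt c) 1) 0    -- product loop, total += product

def part1 (data : List String) : Int := pvTotalA (pvParse data)

-- ===== PORT B =====
-- B's inner comprehension: acc = [a + v if o == "+" else a * v for a, o, v in zip(acc, ops, row)]
def pvStepB (ops : List (Int ⊕ String)) (acc : List Int) (row : List (Int ⊕ String)) : List Int :=
  (acc.zip (ops.zip row)).map (fun p =>
    if p.2.1 = Sum.inr "+" then p.1 + pvCellInt p.2.2 else p.1 * pvCellInt p.2.2)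

-- ops = data[-1] (IndexError on empty data = none, excluded by Pre_part1)
def pvOpsOf (pdata : List (List (Int ⊕ String))) : List (Int ⊕ String) :=
  (PySem.List.pyGet? pdata (-1)).getD []

-- acc = [0 if ops[i] == "+" else 1 for i in range(len(data[0]))]
def pvAcc0 (ops : List (Int ⊕ String)) (n : Nat) : List Int :=
  (List.range n).map (fun (i : Nat) =>
    if (PySem.List.pyGet? ops (i : Int)).getD (Sum.inl 0) = Sum.inr "+" then (0 : Int) else 1)

-- phase 2 of B: ops = data[-1]; accumulators seeded from ops; one streaming pass over data[:-1]
def pvTotalB (pdata : List (List (Int ⊕ String))) : Int :=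
  (pdata.dropLast.foldl (pvStepB (pvOpsOf pdata)) (pvAcc0 (pvOpsOf pdata) (pdata.headD []).length)).sum

def part1_alt (data : List String) : Int := pvTotalB (pvParse data)

-- ===== PRECONDITION & SPEC =====
-- Pre_part1 is exactly where the Python A returns normally: data nonempty; no empty row string
-- (s[0] would be IndexError); every non-operator row fully int()-parseable (else ValueError);
-- every row at least as long, tokenised, as row 0 (else IndexError in the column loop); and when
-- there are ≥ 2 rows and row 0 has a column, no row before the last is an operator row (its
-- string cells would make sum / * raise TypeError).
def Pre_part1 (data : List String) : Prop :=
  data ≠ [] ∧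
  (∀ s ∈ data, s.toList ≠ []) ∧
  (∀ s ∈ data, pvIsOp s = true ∨ ∀ t ∈ pvTokens s, (PySem.Int.ofStr? t).isSome) ∧
  (∀ s ∈ data, (pvTokens (data.headD "")).length ≤ (pvTokens s).length) ∧
  (2 ≤ data.length → pvTokens (data.headD "") ≠ [] → ∀ s ∈ data.dropLast, pvIsOp s = false)
instance (data : List String) : Decidable (Pre_part1 data) := by unfold Pre_part1; infer_instance

def pvWitness_part1 : List String := ["1 2", "3 4", "* +"]

def Spec_part1 (data : List String) (out : Int) : Prop := out = part1_alt data
instance (data : List String) (out : Int) : Decidable (Spec_part1 data out) := by unfold Spec_part1; infer_instance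

-- ===== CLAIM (what is proved, stated in full; the proofs are below) =====
def Claim_equal_part1 : Prop := ∀ (data : List String), Dom_part1 data → Pre_part1 data → Spec_part1 data (part1 data)

-- ===== LEMMAS AND PROOFS =====

-- each parsed row has the tokenised length
theorem pvRowLen (s : String) :
    ((fun s => if pvIsOp s then pvProcessRow s false else pvProcessRow s true) s).length
      = (pvTokens s).length := by
  by_cases h : pvIsOp s <;> simp [h, pvProcessRow]

-- one step of B on a list of column values, written column-wise
theorem pvStepB_map_range (ops row : List (Int ⊕ String)) (n : Nat) (g : Nat → Int)
    (hops : n ≤ ops.length) (hrow : n ≤ row.length) :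
    pvStepB ops ((List.range n).map g) row
      = (List.range n).map (fun i =>
          if ops.getD i (Sum.inl 0) = Sum.inr "+" then
            g i + pvCellInt (row.getD i (Sum.inl 0))
          else
            g i * pvCellInt (row.getD i (Sum.inl 0))) := by
  apply List.ext_getElem
  · simp [pvStepB]; omega
  · intro i h1 h2
    have hi : i < n := by simpa using h2
    simp [pvStepB, List.getElem_zip, Nat.lt_of_lt_of_le hi hops, Nat.lt_of_lt_of_le hi hrow]

-- B's whole streaming pass, written column-wise
theorem pvFoldB_map_range (ops : List (Int ⊕ String)) (n : Nat)
    (rows : List (List (Int ⊕ String))) (g : Nat → Int)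
    (hops : n ≤ ops.length) (hrows : ∀ r ∈ rows, n ≤ r.length) :
    rows.foldl (pvStepB ops) ((List.range n).map g)
      = (List.range n).map (fun i => rows.foldl (fun a r =>
          if ops.getD i (Sum.inl 0) = Sum.inr "+" then
            a + pvCellInt (r.getD i (Sum.inl 0))
          else
            a * pvCellInt (r.getD i (Sum.inl 0))) (g i)) := by
  induction rows generalizing g with
  | nil => simp
  | cons r rs ih =>
      have hr : n ≤ r.length := hrows r (List.mem_cons_self ..)
      simp only [List.foldl_cons, pvStepB_map_range ops r n g hops hr]
      rw [ih _ (fun r hr => hrows r (List.mem_cons_of_mem _ hr))]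

-- A's nums list for column i is the i-th column of the rows before the last
theorem pvNums_eq (pdata : List (List (Int ⊕ String))) (i : Nat) :
    (List.range (pdata.length - 1)).map (fun j => pvCellAt pdata j i)
      = pdata.dropLast.map (fun r => r.getD i (Sum.inl 0)) := by
  apply List.ext_getElem
  · simp
  · intro j h1 h2
    have hj : j < pdata.length - 1 := by simpa using h1
    have hj' : j < pdata.length := by omega
    simp [pvCellAt, List.getElem_dropLast, PySem.List.pyGet?_natCast,
      hj', List.getD_eq_getElem?_getD]

-- ===== VERDICT (by name: the statement is the Claim_ definition above) =====
theorem part1_spec : Claim_equal_part1 := by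
  intro data _ hpre
  obtain ⟨hne, -, -, hlen, -⟩ := hpre
  unfold Spec_part1 part1 part1_alt pvTotalA pvTotalB pvAcc0
  set pdata := pvParse data with hpdata
  have hpne : pdata ≠ [] := by
    cases data with
    | nil => exact absurd rfl hne
    | cons a l => simp [hpdata, pvParse]
  -- every parsed row's length is its token count, and is ≥ n := tokens of row 0
  have hmem_len : ∀ r ∈ pdata, (pvTokens (data.headD "")).length ≤ r.length := by
    intro r hr
    obtain ⟨s, hs, rfl⟩ := List.mem_map.mp hr
    rw [pvRowLen s]; exact hlen s hs
  have hn0 : (pdata.headD []).length = (pvTokens (data.headD "")).length := by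
    cases data with
    | nil => exact absurd rfl hne
    | cons a l => simp [hpdata, pvParse, pvRowLen a]
  set n := (pdata.headD []).length with hn
  set ops := pvOpsOf pdata with hops
  rw [pvOpsOf] at hops
  have hopslen : n ≤ ops.length := by
    rw [hops, PySem.List.pyGet?_neg_one, List.getLast?_eq_some_getLast hpne, Option.getD_some, hn0]
    exact hmem_len _ (List.getLast_mem hpne)
  have hrowslen : ∀ r ∈ pdata.dropLast, n ≤ r.length := by
    intro r hr
    rw [hn0]; exact hmem_len r (List.dropLast_subset _ hr)
  -- simplify B: column-wise form
  rw [pvFoldB_map_range ops n pdata.dropLast _ hopslen hrowslen]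
  -- simplify A: push the per-column work into a single map, then compare sums
  have hA : ∀ (total : Int) (i : Nat),
      (fun total i =>
        let nums := (List.range (pdata.length - 1)).foldl (fun acc j => acc ++ [pvCellAt pdata j i]) []
        if (PySem.List.pyGet? ((PySem.List.pyGet? pdata (-1)).getD []) (i : Int)).getD (Sum.inl 0)
            = Sum.inr "+" then
          total + nums.foldl (fun a c => a + pvCellInt c) 0
        else
          total + nums.foldl (fun p c => p * pvCellInt c) 1) total i
      = total +
        (if ops.getD i (Sum.inl 0) = Sum.inr "+" then
          (pdata.dropLast.map (fun r => r.getD i (Sum.inl 0))).foldl (fun a c => a + pvCellInt c) 0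
        else
          (pdata.dropLast.map (fun r => r.getD i (Sum.inl 0))).foldl (fun p c => p * pvCellInt c) 1) := by
    intro total i
    simp only [PySem.List.foldl_append_singleton_eq_map, List.nil_append, pvNums_eq pdata i,
      ← hops, PySem.List.pyGet?_natCast, List.getD_eq_getElem?_getD]
    split <;> rfl
  refine (PySem.List.foldl_congr_mem _ _ _ 0 (fun total i _ => hA total i)).trans ?_
  rw [PySem.List.foldl_add]
  rw [zero_add]
  congr 1
  apply List.map_congr_left
  intro i _
  simp only [PySem.List.pyGet?_natCast, ← List.getD_eq_getElem?_getD]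
  by_cases hc : ops.getD i (Sum.inl 0) = Sum.inr "+"
  · simp only [if_pos hc, List.foldl_map]
  · simp only [if_neg hc, List.foldl_map]
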